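-- pv_equiv track=rewrite | github.com/Kaimed/shitty-AI-stuff | proj_1/tokens_game_2.py | generate_losses
-- ===== SOURCE A (Python) =====
-- def generate_losses(n):
--     '''GENERATES ALL LOSING NUMBERS UP TO n AND RETURNS THEM IN A LIST'''
--     lst = []
--     add_factor = 2
--     i = 1
--     while(i <= n):
--         lst.append(i)
--         i = i+add_factor
--         add_factor *= 2
--     return lst
-- ===== SOURCE B (Python) =====
-- def generate_losses(n):
--     '''GENERATES ALL LOSING NUMBERS UP TO n AND RETURNS THEM IN A LIST'''
--     if n < 1:
--         return []
--     m = (n + 1).bit_length() - 1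
--     return [2 ** k - 1 for k in range(1, m + 1)]
-- ===== Notes on version B (the rewrite author's own statement) =====
-- stated objective: alternative
-- what changed: B computes the count of losing numbers in closed form via bit_length (floor log2 of n+1) and produces each element 2**k-1 directly from its index k, instead of A's while loop maintaining a running value i and a doubling add_factor.
import Mathlib
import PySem

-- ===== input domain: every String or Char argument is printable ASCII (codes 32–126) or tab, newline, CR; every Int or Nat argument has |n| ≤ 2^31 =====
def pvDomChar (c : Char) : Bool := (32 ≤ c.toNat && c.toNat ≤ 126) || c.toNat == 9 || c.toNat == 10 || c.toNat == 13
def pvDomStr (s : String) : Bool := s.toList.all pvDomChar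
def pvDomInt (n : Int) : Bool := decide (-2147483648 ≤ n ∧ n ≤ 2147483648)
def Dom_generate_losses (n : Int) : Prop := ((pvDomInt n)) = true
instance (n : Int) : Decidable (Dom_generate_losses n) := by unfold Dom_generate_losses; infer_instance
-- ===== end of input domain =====

-- B computes the count of losing numbers in closed form via floor log2 (bit_length)
-- and derives each element 2^k-1 directly from its index k, instead of A's running
-- accumulator loop; objective: alternative algorithm, same cost.


-- ===== PORT A =====
-- A's while loop: state (i, add_factor); add_factor stays positive, which is the
-- termination argument (it is an invariant of A's loop, carried as a hypothesis).
def lossLoop (n i add : Int) (h : 0 < add) : List Int :=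
  if _hle : i ≤ n then i :: lossLoop n (i + add) (add * 2) (by omega) else []
termination_by (n + 1 - i).toNat
decreasing_by omega

def generate_losses (n : Int) : List Int := lossLoop n 1 2 (by norm_num)

-- ===== PORT B =====
-- Source B: if n < 1: []; m = (n+1).bit_length() - 1  (= floor log2 of n+1 = Nat.log2);
-- return [2**k - 1 for k in range(1, m+1)]
def generate_losses_alt (n : Int) : List Int :=
  if n < 1 then []
  else
    (PySem.List.pyRange 1 (((n + 1).toNat.log2 : Int) + 1) 1).map (fun k => 2 ^ k.toNat - 1)

-- ===== PRECONDITION & SPEC =====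
def Spec_generate_losses (n : Int) (out : List Int) : Prop := out = generate_losses_alt n
instance (n : Int) (out : List Int) : Decidable (Spec_generate_losses n out) := by unfold Spec_generate_losses; infer_instance

-- ===== CLAIM (what is proved, stated in full; the proofs are below) =====
def Claim_equal_generate_losses : Prop := ∀ (n : Int), Dom_generate_losses n → Spec_generate_losses n (generate_losses n)

-- ===== LEMMAS AND PROOFS =====

-- floor log2 of n+1 (as a Nat); the number of losing numbers ≤ n
def lossM (n : Int) : Nat := (n + 1).toNat.log2

lemma lossM_le_iff (n : Int) (k : Nat) (hk : 1 ≤ k) :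
    (2 : Int) ^ k - 1 ≤ n ↔ k ≤ lossM n := by
  unfold lossM
  constructor
  · intro h
    have h2 : (2 : Int) ^ k ≤ n + 1 := by omega
    have hpos : (2 : Int) ^ k ≥ 2 := by
      calc (2:Int) ^ 1 ≤ 2 ^ k := by
            exact pow_le_pow_right₀ (by norm_num) hk
        _ = _ := by ring_nf
    have hn1 : (n + 1).toNat ≠ 0 := by omega
    rw [Nat.le_log2 hn1]
    have : ((2:Nat) ^ k : Int) ≤ ((n+1).toNat : Int) := by push_cast; omega
    exact_mod_cast this
  · intro h
    have hn1 : (n + 1).toNat ≠ 0 := by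
      intro h0
      rw [h0] at h
      simp [Nat.log2] at h; omega
    have := (Nat.le_log2 hn1).mp h
    have : ((2:Nat) ^ k : Int) ≤ ((n+1).toNat : Int) := by exact_mod_cast this
    push_cast at this
    omega

lemma lossLoop_eq (n i add : Int) (k : Nat) (hk : 1 ≤ k)
    (hi : i = 2 ^ k - 1) (ha : add = 2 ^ k) (h : 0 < add) :
    lossLoop n i add h
      = (List.range' k (lossM n + 1 - k)).map (fun j => (2:Int) ^ j - 1) := by
  by_cases hle : i ≤ n
  · have hkM : k ≤ lossM n := (lossM_le_iff n k hk).mp (hi ▸ hle)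
    have hcnt : lossM n + 1 - k = (lossM n + 1 - (k + 1)) + 1 := by omega
    rw [lossLoop, dif_pos hle, hcnt, List.range'_succ, List.map_cons]
    have ih := lossLoop_eq n (i + add) (add * 2) (k + 1) (by omega)
      (by rw [hi, ha]; ring) (by rw [ha]; ring) (by omega)
    rw [ih, hi]
  · have hkM : lossM n < k := by
      by_contra hc
      exact hle (hi ▸ (lossM_le_iff n k hk).mpr (by omega))
    have hz : lossM n + 1 - k = 0 := by omega
    rw [lossLoop, dif_neg hle, hz]
    simp
termination_by (n + 1 - i).toNat
decreasing_by omega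

lemma alt_eq (n : Int) :
    generate_losses_alt n = (List.range' 1 (lossM n)).map (fun j => (2:Int) ^ j - 1) := by
  unfold generate_losses_alt
  by_cases hn : n < 1
  · have h01 : (n + 1).toNat = 0 ∨ (n + 1).toNat = 1 := by omega
    have hM : lossM n = 0 := by
      unfold lossM
      rcases h01 with h | h <;> rw [h] <;> rfl
    simp [hn, hM]
  · rw [if_neg hn, PySem.List.pyRange_one]
    have hcnt : (((n + 1).toNat.log2 : Int) + 1 - 1).toNat = lossM n := by
      unfold lossM; omega
    rw [hcnt, List.range'_eq_map_range, List.map_map, List.map_map]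
    apply List.map_congr_left
    intro a _
    simp only [Function.comp_apply]
    congr 1

-- ===== VERDICT (by name: the statement is the Claim_ definition above) =====
theorem generate_losses_spec : Claim_equal_generate_losses := by
  intro n _
  unfold Spec_generate_losses generate_losses
  rw [lossLoop_eq n 1 2 1 le_rfl (by norm_num) (by norm_num), alt_eq]
  congr 1
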